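-- pv_equiv track=rewrite | github.com/kk98033/UVa-Python | 10050.py | solve
-- ===== SOURCE A (Python) =====
-- def solve(days, party):
--     strike = set()
--     for i in party:
--         temp = i
--         while temp <= days:
--             if temp % 7 != 6 and temp % 7 != 0:
--                 strike.add(temp)
--             temp += i
--
--     return len(strike)
-- ===== SOURCE B (Python) =====
-- def solve(days, party):
--     count = 0
--     for d in range(1, days + 1):
--         if d % 7 == 6 or d % 7 == 0:
--             continue
--         if any(d % p == 0 for p in party):
--             count += 1
--     return count
-- ===== Notes on version B (the rewrite author's own statement) =====
-- stated objective: simpler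
-- what changed: B makes a single pass over the days 1..days testing divisibility by any party member, instead of stepping through each member's multiples and deduplicating them in a set.
import Mathlib
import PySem

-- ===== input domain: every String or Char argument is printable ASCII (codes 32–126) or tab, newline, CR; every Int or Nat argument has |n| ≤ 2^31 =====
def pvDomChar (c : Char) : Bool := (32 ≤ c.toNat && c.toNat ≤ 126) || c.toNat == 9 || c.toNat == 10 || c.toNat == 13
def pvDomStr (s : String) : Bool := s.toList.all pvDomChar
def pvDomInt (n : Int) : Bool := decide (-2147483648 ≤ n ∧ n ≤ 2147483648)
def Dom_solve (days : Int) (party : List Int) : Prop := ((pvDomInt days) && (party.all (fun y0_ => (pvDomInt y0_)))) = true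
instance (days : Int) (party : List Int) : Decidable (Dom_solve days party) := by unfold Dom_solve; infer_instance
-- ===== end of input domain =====

-- B scans each day 1..days once, testing divisibility by the party members, instead of A's walk
-- over every member's multiples deduplicated in a set; objective: simpler (no set needed).

-- ===== PORT A =====
-- the 'while temp <= days: … temp += i' loop; when i ≤ 0 and temp ≤ days the Python loop never
-- terminates (those inputs are excluded by Pre_solve), so the port stops there.
-- The internal 'strike' set (never returned, only its len is) is modelled by Std.HashSet,
-- matching Python's O(1) hash-set add; 'strike.add(temp)' is 'strike.insert temp'.
def solveWhile (days i : Int) (temp : Int) (strike : Std.HashSet Int) : Std.HashSet Int :=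
  if _h : temp ≤ days then
    if _hi : 0 < i then
      solveWhile days i (temp + i)
        (if PySem.Int.mod temp 7 ≠ 6 ∧ PySem.Int.mod temp 7 ≠ 0 then strike.insert temp else strike)
    else strike
  else strike
termination_by (days + 1 - temp).toNat
decreasing_by omega

def solve (days : Int) (party : List Int) : Int :=
  ((party.foldl (fun strike i => solveWhile days i i strike) (∅ : Std.HashSet Int)).size : Int)

-- ===== PORT B =====
def solve_alt (days : Int) (party : List Int) : Int :=
  (PySem.List.pyRange 1 (days + 1) 1).foldl
    (fun count d =>
      if PySem.Int.mod d 7 = 6 ∨ PySem.Int.mod d 7 = 0 then count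
      else if party.any (fun p => PySem.Int.mod d p == 0) then count + 1 else count)
    0

-- ===== PRECONDITION & SPEC =====
-- Pre_ excludes exactly the inputs on which A never returns: a party member i ≤ 0 with i ≤ days
-- makes A's 'temp += i' loop run forever. A returns on every other input.
def Pre_solve (days : Int) (party : List Int) : Prop :=
  ∀ p ∈ party, 0 < p ∨ days < p
instance (days : Int) (party : List Int) : Decidable (Pre_solve days party) := by
  unfold Pre_solve; infer_instance

def pvWitness_solve : Int × List Int := (40, [3, 2])

def Spec_solve (days : Int) (party : List Int) (out : Int) : Prop := out = solve_alt days party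
instance (days : Int) (party : List Int) (out : Int) : Decidable (Spec_solve days party out) := by unfold Spec_solve; infer_instance

-- ===== CLAIM (what is proved, stated in full; the proofs are below) =====
def Claim_equal_solve : Prop := ∀ (days : Int) (party : List Int), Dom_solve days party → Pre_solve days party → Spec_solve days party (solve days party)

-- ===== LEMMAS AND PROOFS =====

-- membership in A's while loop: the weekday multiples temp + k*i (k ≥ 0, i > 0) up to days
theorem mem_solveWhile (days i temp : Int) (s : Std.HashSet Int) (hi : 0 < i) (x : Int) :
    x ∈ solveWhile days i temp s ↔
      x ∈ s ∨ (temp ≤ x ∧ x ≤ days ∧ i ∣ (x - temp) ∧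
        PySem.Int.mod x 7 ≠ 6 ∧ PySem.Int.mod x 7 ≠ 0) := by
  fun_induction solveWhile days i temp s with
  | case1 temp s h hi' ih =>
      simp only [dite_eq_ite] at ih
      rw [ih]
      have hadd : x ∈ (if PySem.Int.mod temp 7 ≠ 6 ∧ PySem.Int.mod temp 7 ≠ 0 then s.insert temp else s)
          ↔ x ∈ s ∨ (x = temp ∧ PySem.Int.mod temp 7 ≠ 6 ∧ PySem.Int.mod temp 7 ≠ 0) := by
        split_ifs with hc
        · rw [Std.HashSet.mem_insert]
          simp only [beq_iff_eq]
          constructor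
          · rintro (rfl | hx)
            · exact Or.inr ⟨rfl, hc⟩
            · exact Or.inl hx
          · rintro (hx | ⟨rfl, _⟩)
            · exact Or.inr hx
            · exact Or.inl rfl
        · constructor
          · tauto
          · rintro (hx | ⟨rfl, hc2⟩)
            · exact hx
            · exact absurd hc2 hc
      rw [hadd]
      constructor
      · rintro ((hx | ⟨rfl, h6, h0⟩) | ⟨h1, h2, hd, h6, h0⟩)
        · exact Or.inl hx
        · exact Or.inr ⟨le_refl _, h, by simp, h6, h0⟩
        · refine Or.inr ⟨by omega, h2, ?_, h6, h0⟩
          have e : x - temp = (x - (temp + i)) + i := by ring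
          rw [e]
          exact dvd_add hd dvd_rfl
      · rintro (hx | ⟨h1, h2, hd, h6, h0⟩)
        · exact Or.inl (Or.inl hx)
        · by_cases hxt : x = temp
          · exact Or.inl (Or.inr ⟨hxt, hxt ▸ h6, hxt ▸ h0⟩)
          · refine Or.inr ⟨?_, h2, ?_, h6, h0⟩
            · have hpos : 0 < x - temp := by omega
              have := Int.le_of_dvd hpos hd
              omega
            · have hdd : i ∣ (x - temp) - i := dvd_sub hd dvd_rfl
              have e : (x - temp) - i = x - (temp + i) := by ring
              rwa [e] at hdd
  | case2 temp s h hi' => omega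
  | case3 temp s h =>
      constructor
      · exact Or.inl
      · rintro (hx | ⟨h1, h2, _⟩)
        · exact hx
        · omega

-- the whole strike set: the weekdays d in [1, days] divisible by some party member
theorem mem_strike (days : Int) (party : List Int) (s : Std.HashSet Int)
    (hpre : ∀ p ∈ party, 0 < p ∨ days < p) (x : Int) :
    x ∈ party.foldl (fun strike i => solveWhile days i i strike) s ↔
      x ∈ s ∨ (1 ≤ x ∧ x ≤ days ∧ PySem.Int.mod x 7 ≠ 6 ∧ PySem.Int.mod x 7 ≠ 0 ∧
        ∃ p ∈ party, p ∣ x) := by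
  induction party generalizing s with
  | nil => simp
  | cons i tail ih =>
      have htail : ∀ p ∈ tail, 0 < p ∨ days < p := fun p hp => hpre p (List.mem_cons_of_mem i hp)
      rw [List.foldl_cons, ih _ htail]
      by_cases hi : 0 < i
      · rw [mem_solveWhile days i i s hi x]
        constructor
        · rintro ((hx | ⟨h1, h2, hd, h6, h0⟩) | ⟨h1, h2, h6, h0, p, hp, hpd⟩)
          · exact Or.inl hx
          · refine Or.inr ⟨by omega, h2, h6, h0, i, List.mem_cons_self, ?_⟩
            have e : x = (x - i) + i := by ring
            rw [e]
            exact dvd_add hd dvd_rfl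
          · exact Or.inr ⟨h1, h2, h6, h0, p, List.mem_cons_of_mem i hp, hpd⟩
        · rintro (hx | ⟨h1, h2, h6, h0, p, hp, hpd⟩)
          · exact Or.inl (Or.inl hx)
          · rcases List.mem_cons.mp hp with rfl | hp'
            · exact Or.inl (Or.inr ⟨Int.le_of_dvd (by omega) hpd, h2, dvd_sub hpd dvd_rfl, h6, h0⟩)
            · exact Or.inr ⟨h1, h2, h6, h0, p, hp', hpd⟩
      · have hdays : days < i := (hpre i List.mem_cons_self).resolve_left hi
        have hskip : solveWhile days i i s = s := by
          rw [solveWhile]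
          split_ifs <;> simp_all
        rw [hskip]
        constructor
        · rintro (hx | ⟨h1, h2, h6, h0, p, hp, hpd⟩)
          · exact Or.inl hx
          · exact Or.inr ⟨h1, h2, h6, h0, p, List.mem_cons_of_mem i hp, hpd⟩
        · rintro (hx | ⟨h1, h2, h6, h0, p, hp, hpd⟩)
          · exact Or.inl hx
          · rcases List.mem_cons.mp hp with rfl | hp'
            · have := Int.le_of_dvd (by omega) hpd
              omega
            · exact Or.inr ⟨h1, h2, h6, h0, p, hp', hpd⟩

-- B's per-day test, as a Bool predicate
def predB (party : List Int) (d : Int) : Bool :=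
  !(decide (PySem.Int.mod d 7 = 6 ∨ PySem.Int.mod d 7 = 0)) &&
    party.any (fun p => PySem.Int.mod d p == 0)

theorem alt_foldl (party : List Int) (l : List Int) (c : Int) :
    l.foldl (fun count d =>
      if PySem.Int.mod d 7 = 6 ∨ PySem.Int.mod d 7 = 0 then count
      else if party.any (fun p => PySem.Int.mod d p == 0) then count + 1 else count) c
    = c + (((l.filter (predB party)).length : Int)) := by
  induction l generalizing c with
  | nil => simp
  | cons d tl ih =>
      rw [List.foldl_cons, ih]
      by_cases h7 : PySem.Int.mod d 7 = 6 ∨ PySem.Int.mod d 7 = 0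
      · have hf : predB party d = false := by
          simp only [predB, decide_eq_true h7, Bool.not_true, Bool.false_and]
        rw [if_pos h7, List.filter_cons_of_neg (by simp [hf])]
      · by_cases hany : party.any (fun p => PySem.Int.mod d p == 0) = true
        · have ht : predB party d = true := by
            simp only [predB, decide_eq_false h7, Bool.not_false, Bool.true_and]
            exact hany
          rw [if_neg h7, if_pos hany, List.filter_cons_of_pos ht]
          simp only [List.length_cons]
          omega
        · have hf : predB party d = false := by
            simp only [predB, eq_false_of_ne_true hany, Bool.and_false]
          rw [if_neg h7, if_neg hany, List.filter_cons_of_neg (by simp [hf])]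

theorem solve_eq_alt (days : Int) (party : List Int) (hpre : ∀ p ∈ party, 0 < p ∨ days < p) :
    ((party.foldl (fun strike i => solveWhile days i i strike) (∅ : Std.HashSet Int)).size : Int)
      = (PySem.List.pyRange 1 (days + 1) 1).foldl
          (fun count d =>
            if PySem.Int.mod d 7 = 6 ∨ PySem.Int.mod d 7 = 0 then count
            else if party.any (fun p => PySem.Int.mod d p == 0) then count + 1 else count) 0 := by
  rw [alt_foldl]
  set S := party.foldl (fun strike i => solveWhile days i i strike) (∅ : Std.HashSet Int) with hS
  have hnodup : S.toList.Nodup :=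
    (Std.HashSet.distinct_toList (m := S)).imp (fun h => by simpa using h)
  have hperm : S.toList.Perm ((PySem.List.pyRange 1 (days + 1) 1).filter (predB party)) := by
    rw [List.perm_ext_iff_of_nodup hnodup ((PySem.List.nodup_pyRange_one 1 (days+1)).filter _)]
    intro x
    rw [Std.HashSet.mem_toList, hS, mem_strike days party _ hpre x, List.mem_filter,
      PySem.List.mem_pyRange_one]
    simp only [predB, Std.HashSet.not_mem_empty, false_or, Bool.and_eq_true,
      Bool.not_eq_true', decide_eq_false_iff_not, List.any_eq_true, beq_iff_eq,
      PySem.Int.mod_eq_zero_iff_dvd]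
    constructor
    · rintro ⟨h1, h2, h6, h0, p, hp, hpd⟩
      refine ⟨⟨h1, by omega⟩, ?_, p, hp, hpd⟩
      rintro (hc | hc)
      · exact h6 hc
      · exact h0 ((PySem.Int.mod_eq_zero_iff_dvd x 7).mpr hc)
    · rintro ⟨⟨h1, h2⟩, hnot, p, hp, hpd⟩
      refine ⟨h1, by omega, fun hc => hnot (Or.inl hc),
        fun hc => hnot (Or.inr ((PySem.Int.mod_eq_zero_iff_dvd x 7).mp hc)), p, hp, hpd⟩
  rw [← Std.HashSet.length_toList, hperm.length_eq]
  omega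

-- ===== VERDICT (by name: the statement is the Claim_ definition above) =====
theorem solve_spec : Claim_equal_solve := by
  intro days party _hdom hpre
  show solve days party = solve_alt days party
  exact solve_eq_alt days party hpre
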